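-- pv_equiv track=rewrite | github.com/alldatacenter/alldata | dts/inlong/inlong-tubemq/tubemq-client-twins/tubemq-client-python/src/python/example/test_producer.py | build_test_data
-- ===== SOURCE A (Python) =====
-- def build_test_data(msg_data_size):
--     transmit_data = "This is a test data!"
--     data = ""
--     while (len(data) + len(transmit_data)) <= msg_data_size:
--         data += transmit_data
--     if len(data) < msg_data_size:
--         data += transmit_data[:msg_data_size - len(data)]
--     return data
-- ===== SOURCE B (Python) =====
-- def build_test_data(msg_data_size):
--     transmit_data = "This is a test data!"
--     return "".join(transmit_data[i % len(transmit_data)] for i in range(msg_data_size))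
-- ===== Notes on version B (the rewrite author's own statement) =====
-- stated objective: faster
-- what changed: Replaces the while-loop that appends whole pattern blocks to a growing string (plus a tail slice) with a single join over output positions, picking each character by modular indexing into the pattern.
import Mathlib
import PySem

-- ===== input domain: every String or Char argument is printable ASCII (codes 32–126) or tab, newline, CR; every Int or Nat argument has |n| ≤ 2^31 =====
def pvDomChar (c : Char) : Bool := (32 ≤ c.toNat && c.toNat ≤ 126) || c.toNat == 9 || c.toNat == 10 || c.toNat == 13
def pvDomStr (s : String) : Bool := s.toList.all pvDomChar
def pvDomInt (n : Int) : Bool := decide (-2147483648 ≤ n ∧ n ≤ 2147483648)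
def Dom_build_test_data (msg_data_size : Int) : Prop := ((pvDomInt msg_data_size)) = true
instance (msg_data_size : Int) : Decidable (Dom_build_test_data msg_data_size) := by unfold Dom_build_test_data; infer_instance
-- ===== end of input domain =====

-- B changes A's block-append while loop into one pass over output positions with modular
-- indexing; the equivalence of the return values is proved on all of Dom.

-- ===== PORT A =====
-- transmit_data as a list of characters (both ports build their result as List Char)
def pvPat : List Char := "This is a test data!".toList

-- the while loop: while len(data) + len(transmit_data) <= msg_data_size: data += transmit_data
def pvLoopA (n : Int) (data : List Char) : List Char :=
  if ((data.length : Int) + (pvPat.length : Int)) ≤ n then pvLoopA n (data ++ pvPat) else data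
termination_by (n - data.length).toNat
decreasing_by
  have hp : pvPat.length = 20 := by decide
  simp only [List.length_append, hp] at *
  omega

def build_test_data (msg_data_size : Int) : String :=
  let data := pvLoopA msg_data_size []
  let data :=
    if (data.length : Int) < msg_data_size then
      -- data += transmit_data[:msg_data_size - len(data)]
      data ++ PySem.List.slice pvPat none (some (msg_data_size - data.length))
    else data
  String.mk data

-- ===== PORT B =====
-- "".join(transmit_data[i % len(transmit_data)] for i in range(msg_data_size))
-- (pyGetD's default ' ' is only a totality guard: i % 20 is always in range)
def build_test_data_alt (msg_data_size : Int) : String :=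
  String.mk ((PySem.List.pyRange 0 msg_data_size 1).map
    (fun i => PySem.List.pyGetD pvPat (PySem.Int.mod i (pvPat.length : Int)) ' '))

-- ===== PRECONDITION & SPEC =====
def Spec_build_test_data (msg_data_size : Int) (out : String) : Prop := out = build_test_data_alt msg_data_size
instance (msg_data_size : Int) (out : String) : Decidable (Spec_build_test_data msg_data_size out) := by unfold Spec_build_test_data; infer_instance

-- ===== CLAIM (what is proved, stated in full; the proofs are below) =====
def Claim_equal_build_test_data : Prop := ∀ (msg_data_size : Int), Dom_build_test_data msg_data_size → Spec_build_test_data msg_data_size (build_test_data msg_data_size)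

-- ===== LEMMAS AND PROOFS =====

-- the "ideal" result: position i of the output is pvPat[i % 20]
def pvIdx (i : Nat) : Char := pvPat.getD (i % 20) ' '
def pvR (m : Nat) : List Char := (List.range m).map pvIdx

theorem pvPat_len : pvPat.length = 20 := by decide

theorem pvRange_map_getD (l : List Char) (d : Char) (t : Nat) (h : t ≤ l.length) :
    (List.range t).map (fun j => l.getD j d) = l.take t := by
  apply List.ext_getElem
  · simp; omega
  · intro i h1 h2
    simp at h1 ⊢
    rw [List.getElem?_eq_getElem (by omega)]
    rfl

theorem pvR_add (m t : Nat) (hm : m % 20 = 0) :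
    pvR (m + t) = pvR m ++ (List.range t).map (fun j => pvPat.getD (j % 20) ' ') := by
  unfold pvR
  rw [List.range_add, List.map_append, List.map_map]
  congr 1
  apply List.map_congr_left
  intro j hj
  simp only [Function.comp, pvIdx]
  congr 1
  omega

theorem pvR_block (m : Nat) (hm : m % 20 = 0) : pvR (m + 20) = pvR m ++ pvPat := by
  rw [pvR_add m 20 hm]
  congr 1

-- the loop + final slice computes pvR n.toNat given the invariant
theorem pvLoopA_spec (k : Nat) : ∀ (n : Int) (data : List Char),
    (n - data.length).toNat ≤ k →
    (data.length : Int) ≤ n → data.length % 20 = 0 → data = pvR data.length →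
    (let d := pvLoopA n data;
     if (d.length : Int) < n then d ++ PySem.List.slice pvPat none (some (n - d.length)) else d)
      = pvR n.toNat := by
  induction k with
  | zero =>
    intro n data hk hle hmod hdata
    rw [pvLoopA]
    have hp : pvPat.length = 20 := pvPat_len
    have hcond : ¬ ((data.length : Int) + (pvPat.length : Int)) ≤ n := by
      rw [hp]; omega
    simp only [hcond, if_false]
    have hlt : ¬ (data.length : Int) < n := by omega
    simp only [hlt, if_false]
    have : n.toNat = data.length := by omega
    rw [this, ← hdata]
  | succ k ih =>
    intro n data hk hle hmod hdata
    rw [pvLoopA]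
    have hp : pvPat.length = 20 := pvPat_len
    by_cases hcond : ((data.length : Int) + (pvPat.length : Int)) ≤ n
    · simp only [hcond, if_true]
      have hlen : (data ++ pvPat).length = data.length + 20 := by
        simp [hp]
      have := ih n (data ++ pvPat)
        (by rw [hlen]; rw [hp] at hcond; omega)
        (by rw [hlen]; rw [hp] at hcond; omega)
        (by rw [hlen]; omega)
        (by rw [hlen, pvR_block data.length hmod, ← hdata])
      exact this
    · simp only [hcond, if_false]
      by_cases hlt : (data.length : Int) < n
      · simp only [hlt, if_true]
        have ht : 0 ≤ n - (data.length : Int) := by omega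
        rw [PySem.List.slice_to pvPat ht]
        set t := (n - (data.length : Int)).toNat with htdef
        have ht20 : t < 20 := by rw [hp] at hcond; omega
        have ht1 : 1 ≤ t := by omega
        have hn : n.toNat = data.length + t := by omega
        rw [hn, pvR_add data.length t hmod, ← hdata]
        congr 1
        have : (List.range t).map (fun j => pvPat.getD (j % 20) ' ')
            = (List.range t).map (fun j => pvPat.getD j ' ') := by
          apply List.map_congr_left
          intro j hj
          simp only [List.mem_range] at hj
          congr 1
          omega
        rw [this, pvRange_map_getD pvPat ' ' t (by omega)]
      · simp only [hlt, if_false]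
        have : n.toNat = data.length := by omega
        rw [this, ← hdata]

-- B's list is pvR n.toNat
theorem pvAlt_spec (n : Int) :
    (PySem.List.pyRange 0 n 1).map
      (fun i => PySem.List.pyGetD pvPat (PySem.Int.mod i (pvPat.length : Int)) ' ')
    = pvR n.toNat := by
  rw [PySem.List.pyRange_one, List.map_map]
  unfold pvR
  have hn : (n - 0).toNat = n.toNat := by omega
  rw [hn]
  apply List.map_congr_left
  intro k _
  simp only [Function.comp, pvIdx, pvPat_len, zero_add]
  have hmod : PySem.Int.mod ((k : Int)) (((20 : Nat) : Int)) = ((k % 20 : Nat) : Int) := by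
    rw [PySem.Int.mod_eq_emod_of_pos (by omega)]
    push_cast
    rfl
  rw [hmod, PySem.List.pyGetD_natCast]

-- ===== VERDICT (by name: the statement is the Claim_ definition above) =====
theorem build_test_data_spec : Claim_equal_build_test_data := by
  intro n _
  unfold Spec_build_test_data build_test_data build_test_data_alt
  rw [pvAlt_spec]
  by_cases hn : 0 ≤ n
  · have := pvLoopA_spec (n.toNat) n [] (by simp only [List.length_nil]; omega)
      (by simp only [List.length_nil]; omega) (by simp) (by simp [pvR])
    simp only at this ⊢
    rw [this]
  · have hloop : pvLoopA n [] = [] := by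
      rw [pvLoopA]
      have : ¬ (((([] : List Char)).length : Int) + (pvPat.length : Int)) ≤ n := by
        rw [pvPat_len]; simp; omega
      simp only [this, if_false]
    simp only [hloop]
    have h1 : ¬ ((([] : List Char)).length : Int) < n := by simp; omega
    simp only [h1, if_false]
    have : n.toNat = 0 := by omega
    rw [this]
    rfl
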